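-- pv_equiv track=rewrite | github.com/benreu/LinuxZPL | zpl_renderer.py | _tokenize_commands
-- ===== SOURCE A (Python) =====
-- from typing import Tuple, List, Optional
--
-- def _tokenize_commands(line: str) -> List[str]:
--     """Split a line into individual ZPL commands."""
--     commands = []
--     current_cmd = ""
--     i = 0
--     while i < len(line):
--         if line[i] == '^' and current_cmd:
--             commands.append(current_cmd)
--             current_cmd = "^"
--         else:
--             current_cmd += line[i]
--         i += 1
--     if current_cmd:
--         commands.append(current_cmd)
--     return commands
-- ===== SOURCE B (Python) =====
-- def _tokenize_commands(line: str):
--     """Split a line into individual ZPL commands.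
--
--     Right-to-left scan: walk the line backwards; each character either extends
--     the current front token (when that token does not yet start with '^') or
--     opens a new token in front of it.  No current-command accumulator, no
--     final flush.
--     """
--     tokens = []
--     for ch in reversed(line):
--         if tokens and not tokens[0].startswith('^'):
--             tokens[0] = ch + tokens[0]
--         else:
--             tokens.insert(0, ch)
--     return tokens
-- ===== Notes on version B (the rewrite author's own statement) =====
-- stated objective: alternative
-- what changed: B scans the line right-to-left, prepending each character to the front token or opening a new token whenever the front token already starts with '^', which removes A's current-command accumulator, its position-dependent '^'-and-nonempty test and the final flush.
import Mathlib
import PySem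

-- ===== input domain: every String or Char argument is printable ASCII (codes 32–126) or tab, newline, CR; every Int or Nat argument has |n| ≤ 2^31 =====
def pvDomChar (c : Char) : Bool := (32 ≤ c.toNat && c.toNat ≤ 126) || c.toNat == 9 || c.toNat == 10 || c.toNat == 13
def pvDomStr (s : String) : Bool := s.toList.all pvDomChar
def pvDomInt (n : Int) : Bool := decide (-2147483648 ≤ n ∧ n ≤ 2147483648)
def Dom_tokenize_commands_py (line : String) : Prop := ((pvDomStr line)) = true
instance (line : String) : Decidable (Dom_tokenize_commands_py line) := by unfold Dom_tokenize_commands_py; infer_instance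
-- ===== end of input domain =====

-- B replaces A's left-to-right scan with accumulator and final flush by a right-to-left
-- scan that prepends each character to the front token or opens a new one (alternative).

-- ===== PORT A =====
-- A's loop state: (commands, current_cmd); tokens are kept as List Char and turned
-- into String at the end (exact: Python str ↔ its character list).
def stepA (st : List (List Char) × List Char) (c : Char) : List (List Char) × List Char :=
  if c = '^' ∧ st.2 ≠ [] then (st.1 ++ [st.2], ['^']) else (st.1, st.2 ++ [c])

-- 'while i < len(line): … line[i] …' visits the characters in order: fold over toList.
def tokenize_commands_py (line : String) : List String :=
  let st := line.toList.foldl stepA ([], [])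
  (if st.2 ≠ [] then st.1 ++ [st.2] else st.1).map String.mk

-- ===== PORT B =====
-- Source B's loop body: tokens[0].startswith('^') is 'headI = ^' for the (always nonempty)
-- tokens Source B builds, and for [] both take the prepend branch.
def stepB (ts : List (List Char)) (c : Char) : List (List Char) :=
  match ts with
  | [] => [[c]]
  | t :: rest => if t.headI = '^' then [c] :: t :: rest else (c :: t) :: rest

-- 'for ch in reversed(line): … tokens.insert(0, ch) / tokens[0] = ch + tokens[0]'
def tokenize_commands_py_alt (line : String) : List String :=
  (line.toList.reverse.foldl stepB []).map String.mk

-- ===== PRECONDITION & SPEC =====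
def Spec_tokenize_commands_py (line : String) (out : List String) : Prop := out = tokenize_commands_py_alt line
instance (line : String) (out : List String) : Decidable (Spec_tokenize_commands_py line out) := by unfold Spec_tokenize_commands_py; infer_instance

-- ===== CLAIM (what is proved, stated in full; the proofs are below) =====
def Claim_equal_tokenize_commands_py : Prop := ∀ (line : String), Dom_tokenize_commands_py line → Spec_tokenize_commands_py line (tokenize_commands_py line)

-- ===== LEMMAS AND PROOFS =====

-- merge a nonempty pending token 'cur' into the front of a token list
def mergeTok (cur : List Char) (ts : List (List Char)) : List (List Char) :=
  match ts with
  | [] => [cur]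
  | t :: rest => if t.headI = '^' then cur :: t :: rest else (cur ++ t) :: rest

def runB (cs : List Char) : List (List Char) := cs.reverse.foldl stepB []

theorem runB_cons (c : Char) (cs : List Char) : runB (c :: cs) = stepB (runB cs) c := by
  simp [runB, List.foldl_reverse]

def finishA (st : List (List Char) × List Char) : List (List Char) :=
  if st.2 ≠ [] then st.1 ++ [st.2] else st.1

theorem key (cs : List Char) : ∀ (cmds : List (List Char)) (cur : List Char), cur ≠ [] →
    finishA (cs.foldl stepA (cmds, cur)) = cmds ++ mergeTok cur (runB cs) := by
  induction cs with
  | nil => intro cmds cur h; simp [finishA, h, mergeTok, runB]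
  | cons c cs ih =>
    intro cmds cur h
    rw [runB_cons]
    by_cases hc : c = '^'
    · subst hc
      have h1 : stepA (cmds, cur) '^' = (cmds ++ [cur], ['^']) := by
        simp [stepA, h]
      rw [List.foldl_cons, h1, ih _ _ (by simp)]
      -- mergeTok ['^'] (runB cs) = stepB (runB cs) '^', and its head starts with '^'
      cases hr : runB cs with
      | nil => simp [mergeTok, stepB]
      | cons t rest =>
        by_cases ht : t.headI = '^' <;>
          simp [mergeTok, stepB, ht]
    · have h1 : stepA (cmds, cur) c = (cmds, cur ++ [c]) := by
        simp [stepA, hc]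
      rw [List.foldl_cons, h1, ih _ _ (by simp)]
      cases hr : runB cs with
      | nil => simp [mergeTok, stepB, hc]
      | cons t rest =>
        by_cases ht : t.headI = '^' <;>
          simp [mergeTok, stepB, ht, hc]

theorem runA_eq_runB (cs : List Char) :
    finishA (cs.foldl stepA ([], [])) = runB cs := by
  cases cs with
  | nil => simp [finishA, runB]
  | cons c cs =>
    have h1 : stepA (([], []) : List (List Char) × List Char) c = ([], [c]) := by
      simp [stepA]
    rw [List.foldl_cons, h1, key cs [] [c] (by simp), runB_cons]
    cases hr : runB cs with
    | nil => simp [mergeTok, stepB]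
    | cons t rest => by_cases ht : t.headI = '^' <;> simp [mergeTok, stepB, ht]

-- ===== VERDICT (by name: the statement is the Claim_ definition above) =====
theorem tokenize_commands_py_spec : Claim_equal_tokenize_commands_py := by
  intro line _
  exact congrArg (List.map String.mk) (runA_eq_runB line.toList)
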